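-- pv_equiv track=rewrite | github.com/dzukauskas/acute-medicine | scripts/workflow_markdown.py | find_section_lines_any
-- ===== SOURCE A (Python) =====
-- from typing import Iterable
--
-- def find_section_lines(sections: dict[tuple[str, ...], list[str]], *suffix: str) -> list[str]:
--     for key, lines in sections.items():
--         if len(key) >= len(suffix) and tuple(key[-len(suffix):]) == suffix:
--             return lines
--     return []
--
-- def find_section_lines_any(
--     sections: dict[tuple[str, ...], list[str]],
--     suffix_options: Iterable[tuple[str, ...]],
-- ) -> list[str]:
--     for suffix in suffix_options:
--         lines = find_section_lines(sections, *suffix)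
--         if lines:
--             return lines
--     return []
-- ===== SOURCE B (Python) =====
-- from typing import Iterable
--
--
-- def find_section_lines_any(
--     sections: dict[tuple[str, ...], list[str]],
--     suffix_options: Iterable[tuple[str, ...]],
-- ) -> list[str]:
--     # Index every suffix of every key once; each suffix maps to the lines of
--     # the FIRST section whose key ends with it (setdefault keeps the first).
--     index: dict[tuple[str, ...], list[str]] = {}
--     for key, lines in sections.items():
--         kt = tuple(key)
--         for l in range(1, len(kt) + 1):
--             index.setdefault(kt[len(kt) - l:], lines)
--         if not kt:
--             # the empty suffix matches only the empty key (key[-0:] == key)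
--             index.setdefault((), lines)
--     for suffix in suffix_options:
--         lines = index.get(tuple(suffix))
--         if lines:
--             return lines
--     return []
-- ===== Notes on version B (the rewrite author's own statement) =====
-- stated objective: faster
-- what changed: Instead of re-scanning all sections for every suffix option, B builds a hash index from every key-suffix to the lines of the first section whose key ends with it, then answers each option by a single dict lookup.
import Mathlib
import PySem

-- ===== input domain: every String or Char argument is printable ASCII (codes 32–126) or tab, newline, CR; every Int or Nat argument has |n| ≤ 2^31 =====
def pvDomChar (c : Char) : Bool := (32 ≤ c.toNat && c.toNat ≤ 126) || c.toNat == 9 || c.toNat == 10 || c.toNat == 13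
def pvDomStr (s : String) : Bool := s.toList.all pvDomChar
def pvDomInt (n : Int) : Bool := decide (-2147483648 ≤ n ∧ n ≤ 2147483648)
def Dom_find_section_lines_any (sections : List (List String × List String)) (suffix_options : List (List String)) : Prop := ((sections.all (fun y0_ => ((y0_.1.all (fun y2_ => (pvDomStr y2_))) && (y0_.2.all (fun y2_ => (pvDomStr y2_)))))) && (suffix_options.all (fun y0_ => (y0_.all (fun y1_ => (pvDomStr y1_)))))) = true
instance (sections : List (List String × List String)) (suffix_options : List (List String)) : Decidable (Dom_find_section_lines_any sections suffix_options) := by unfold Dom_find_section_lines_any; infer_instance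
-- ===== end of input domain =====

-- B replaces A's per-option scan of all sections by a suffix→lines hash index built once (faster; lookups instead of rescans).

-- ===== PORT A =====
-- find_section_lines(sections, *suffix): first section whose key ends with `suffix`
def pvFindSectionLines (sections : List (List String × List String)) (suffix : List String) : List String :=
  match sections with
  | [] => []
  | (key, lines) :: rest =>
    if PySem.List.len suffix ≤ PySem.List.len key ∧
        PySem.List.slice key (some (-(PySem.List.len suffix))) none = suffix
    then lines
    else pvFindSectionLines rest suffix

def find_section_lines_any (sections : List (List String × List String)) (suffix_options : List (List String)) : List String :=
  match suffix_options with
  | [] => []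
  | suffix :: rest =>
    let lines := pvFindSectionLines sections suffix
    if lines.isEmpty then find_section_lines_any sections rest else lines

-- ===== PORT B =====
-- index.setdefault(kt[len(kt)-l:], lines) for l in range(1, len(kt)+1); plus () for the empty key
def pvBuildIndex (sections : List (List String × List String)) :
    PySem.Dict (List String) (List String) :=
  sections.foldl
    (fun d kl =>
      let d1 := (PySem.List.pyRange 1 (PySem.List.len kl.1 + 1) 1).foldl
        (fun d l =>
          d.setdefault (PySem.List.slice kl.1 (some (PySem.List.len kl.1 - l)) none) kl.2) d
      if kl.1.isEmpty then d1.setdefault [] kl.2 else d1)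
    PySem.Dict.empty

def pvLookupLoop (index : PySem.Dict (List String) (List String))
    (suffix_options : List (List String)) : List String :=
  match suffix_options with
  | [] => []
  | suffix :: rest =>
    match index.get? suffix with
    | some lines => if lines.isEmpty then pvLookupLoop index rest else lines
    | none => pvLookupLoop index rest

def find_section_lines_any_alt (sections : List (List String × List String)) (suffix_options : List (List String)) : List String :=
  pvLookupLoop (pvBuildIndex sections) suffix_options

-- ===== PRECONDITION & SPEC =====
def Spec_find_section_lines_any (sections : List (List String × List String)) (suffix_options : List (List String)) (out : List String) : Prop := out = find_section_lines_any_alt sections suffix_options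
instance (sections : List (List String × List String)) (suffix_options : List (List String)) (out : List String) : Decidable (Spec_find_section_lines_any sections suffix_options out) := by unfold Spec_find_section_lines_any; infer_instance

-- ===== CLAIM (what is proved, stated in full; the proofs are below) =====
def Claim_equal_find_section_lines_any : Prop := ∀ (sections : List (List String × List String)) (suffix_options : List (List String)), Dom_find_section_lines_any sections suffix_options → Spec_find_section_lines_any sections suffix_options (find_section_lines_any sections suffix_options)

-- ===== LEMMAS AND PROOFS =====

-- the first section whose key ends with s, as an Option (proof-side characterisation)
def pvFirst (sections : List (List String × List String)) (s : List String) :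
    Option (List String) :=
  match sections with
  | [] => none
  | (key, lines) :: rest =>
    if PySem.List.len s ≤ PySem.List.len key ∧
        PySem.List.slice key (some (-(PySem.List.len s))) none = s
    then some lines
    else pvFirst rest s

-- the per-section step of pvBuildIndex, named so the proofs can speak about it
def pvStep (d : PySem.Dict (List String) (List String)) (kl : List String × List String) :
    PySem.Dict (List String) (List String) :=
  let d1 := (PySem.List.pyRange 1 (PySem.List.len kl.1 + 1) 1).foldl
    (fun d l =>
      d.setdefault (PySem.List.slice kl.1 (some (PySem.List.len kl.1 - l)) none) kl.2) d
  if kl.1.isEmpty then d1.setdefault [] kl.2 else d1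

theorem pvBuildIndex_eq_foldl (sections : List (List String × List String)) :
    pvBuildIndex sections = sections.foldl pvStep PySem.Dict.empty := rfl

theorem pvFindSectionLines_eq_pvFirst (sections : List (List String × List String))
    (s : List String) : pvFindSectionLines sections s = (pvFirst sections s).getD [] := by
  induction sections with
  | nil => rfl
  | cons kl rest ih =>
    obtain ⟨key, lines⟩ := kl
    simp only [pvFindSectionLines, pvFirst]
    split_ifs <;> simp [ih]

-- a fold of setdefault with a fixed value: the first occurrence wins, later ones are no-ops
theorem get?_foldl_setdefault {κ ν : Type} [BEq κ] [LawfulBEq κ] (ks : List κ) (v : ν)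
    (d : PySem.Dict κ ν) (s : κ) :
    (ks.foldl (fun d k => d.setdefault k v) d).get? s =
      if s ∈ ks then some ((d.get? s).getD v) else d.get? s := by
  induction ks generalizing d with
  | nil => simp
  | cons k rest ih =>
    simp only [List.foldl_cons, ih, List.mem_cons]
    by_cases hk : s = k
    · subst hk
      by_cases hm : s ∈ rest <;>
        simp [hm, PySem.Dict.get?_setdefault_self, Option.getD]
    · rw [PySem.Dict.get?_setdefault_of_ne _ _ hk]
      by_cases hm : s ∈ rest <;> simp [hm, hk]

-- the condition A tests for a key, restated over the tails B indexes
theorem pvMatches_iff (key s : List String) (hs : s ≠ []) :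
    (PySem.List.len s ≤ PySem.List.len key ∧
        PySem.List.slice key (some (-(PySem.List.len s))) none = s) ↔
      (1 ≤ s.length ∧ s.length ≤ key.length ∧ key.drop (key.length - s.length) = s) := by
  have hpos : 0 < s.length := List.length_pos_of_ne_nil hs
  simp only [PySem.List.len_eq]
  rw [PySem.List.slice_from_neg_natCast key s.length hpos]
  constructor
  · rintro ⟨h1, h2⟩
    exact ⟨hpos, by exact_mod_cast h1, h2⟩
  · rintro ⟨_, h1, h2⟩
    exact ⟨by exact_mod_cast h1, h2⟩

-- which lists appear among the indexed tails of a key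
theorem mem_tails_iff (key s : List String) :
    (s ∈ (PySem.List.pyRange 1 (PySem.List.len key + 1) 1).map
        (fun l => PySem.List.slice key (some (PySem.List.len key - l)) none)) ↔
      (1 ≤ s.length ∧ s.length ≤ key.length ∧ key.drop (key.length - s.length) = s) := by
  simp only [List.mem_map, PySem.List.mem_pyRange_one, PySem.List.len_eq]
  constructor
  · rintro ⟨l, ⟨hl1, hl2⟩, hslice⟩
    have hnn : (0:Int) ≤ (key.length : Int) - l := by omega
    rw [PySem.List.slice_from key hnn] at hslice
    have htoNat : ((key.length : Int) - l).toNat = key.length - l.toNat := by omega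
    rw [htoNat] at hslice
    have hlen : s.length = l.toNat := by
      rw [← hslice, List.length_drop]; omega
    refine ⟨by omega, by omega, ?_⟩
    rw [hlen]; exact hslice
  · rintro ⟨h0, h1, h2⟩
    refine ⟨(s.length : Int), ⟨by exact_mod_cast h0, by omega⟩, ?_⟩
    have hnn : (0:Int) ≤ (key.length : Int) - (s.length : Int) := by omega
    rw [PySem.List.slice_from key hnn]
    have htoNat : ((key.length : Int) - (s.length : Int)).toNat = key.length - s.length := by
      omega
    rw [htoNat]; exact h2

-- processing one section updates the index exactly where the key matches, keeping earlier entries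
theorem get?_pvStep (key lines : List String) (d : PySem.Dict (List String) (List String))
    (s : List String) :
    (pvStep d (key, lines)).get? s =
      if PySem.List.len s ≤ PySem.List.len key ∧
          PySem.List.slice key (some (-(PySem.List.len s))) none = s
      then some ((d.get? s).getD lines)
      else d.get? s := by
  have hfold :
      ((PySem.List.pyRange 1 (PySem.List.len key + 1) 1).foldl
        (fun d l =>
          d.setdefault (PySem.List.slice key (some (PySem.List.len key - l)) none) lines)
        d).get? s =
      if (1 ≤ s.length ∧ s.length ≤ key.length ∧ key.drop (key.length - s.length) = s)
      then some ((d.get? s).getD lines) else d.get? s := by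
    rw [← List.foldl_map
      (f := fun l => PySem.List.slice key (some (PySem.List.len key - l)) none)
      (g := fun d k => PySem.Dict.setdefault d k lines)]
    rw [get?_foldl_setdefault]
    by_cases hm : (1 ≤ s.length ∧ s.length ≤ key.length ∧ key.drop (key.length - s.length) = s)
    · rw [if_pos ((mem_tails_iff key s).mpr hm), if_pos hm]
    · rw [if_neg (fun h => hm ((mem_tails_iff key s).mp h)), if_neg hm]
  by_cases hk : key = []
  · subst hk
    simp only [pvStep, List.isEmpty_nil, if_true]
    have hrange : PySem.List.pyRange 1 (PySem.List.len ([] : List String) + 1) 1 = [] := by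
      decide
    rw [hrange, List.foldl_nil]
    by_cases hs : s = []
    · subst hs
      rw [PySem.Dict.get?_setdefault_self, if_pos (by decide)]
    · rw [PySem.Dict.get?_setdefault_of_ne _ _ hs]
      rw [if_neg ?_]
      rintro ⟨h1, -⟩
      have := List.length_pos_of_ne_nil hs
      simp only [PySem.List.len_eq, List.length_nil, Nat.cast_zero] at h1
      omega
  · have hkey : ¬ key.isEmpty = true := by simp [hk]
    simp only [pvStep, if_neg hkey]
    rw [hfold]
    by_cases hs : s = []
    · subst hs
      rw [if_neg (by simp), if_neg ?_]
      rintro ⟨-, h2⟩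
      simp only [PySem.List.len_eq, List.length_nil, Nat.cast_zero, neg_zero,
        PySem.List.slice_zero_start, PySem.List.slice_none_none] at h2
      exact hk h2
    · exact if_congr (pvMatches_iff key s hs).symm rfl rfl

-- the built index answers every lookup with the first matching section's lines
theorem get?_buildIndexAux (sections : List (List String × List String))
    (d : PySem.Dict (List String) (List String)) (s : List String) :
    (sections.foldl pvStep d).get? s =
      match d.get? s with
      | some v => some v
      | none => pvFirst sections s := by
  induction sections generalizing d with
  | nil =>
    simp only [List.foldl_nil]
    cases h : d.get? s <;> simp [pvFirst]
  | cons kl rest ih =>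
    obtain ⟨key, lines⟩ := kl
    simp only [List.foldl_cons]
    rw [ih, get?_pvStep]
    simp only [pvFirst]
    by_cases hm : PySem.List.len s ≤ PySem.List.len key ∧
        PySem.List.slice key (some (-(PySem.List.len s))) none = s
    · rw [if_pos hm, if_pos hm]
      cases d.get? s <;> rfl
    · rw [if_neg hm, if_neg hm]

theorem get?_buildIndex (sections : List (List String × List String)) (s : List String) :
    (pvBuildIndex sections).get? s = pvFirst sections s := by
  rw [pvBuildIndex_eq_foldl, get?_buildIndexAux, PySem.Dict.get?_empty]

-- ===== VERDICT (by name: the statement is the Claim_ definition above) =====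
theorem find_section_lines_any_spec : Claim_equal_find_section_lines_any := by
  unfold Claim_equal_find_section_lines_any
  intro sections suffix_options hdom
  clear hdom
  unfold Spec_find_section_lines_any find_section_lines_any_alt
  induction suffix_options with
  | nil => rfl
  | cons s rest ih =>
    simp only [find_section_lines_any, pvLookupLoop,
      pvFindSectionLines_eq_pvFirst, get?_buildIndex]
    cases h : pvFirst sections s with
    | none => simpa using ih
    | some ls => by_cases hls : ls.isEmpty <;> simp [hls, ih]
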